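-- pv_equiv track=rewrite | github.com/abubakirov06/Practice-Week-7 | problem2.py | find_saddle_point_coordinates
-- ===== SOURCE A (Python) =====
-- def find_saddle_point_coordinates(grid):
--     column_coordinate = 0
--     row_coordinate = 0
--     column_list = []
--     n = 0
--     for i in range(len(grid)):
--         for j in range(len(grid[0])):
--             if grid[i][j] == min(grid[i]):
--                 for k in range(len(grid)):
--                     column_list.append(grid[k][j])
--                 if grid[i][j] == max(column_list):
--                     row_coordinate = i
--                     column_coordinate = j
--                     n = 1
--     if n:
--         return (row_coordinate, column_coordinate)
--     else:
--         return None
-- ===== SOURCE B (Python) =====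
-- def find_saddle_point_coordinates(grid):
--     if not grid or not grid[0]:
--         return None
--     rows, cols = len(grid), len(grid[0])
--     row_mins = [min(row) for row in grid]
--     col_maxs = [max(grid[i][j] for i in range(rows)) for j in range(cols)]
--     ans = None
--     for i in range(rows):
--         for j in range(cols):
--             if grid[i][j] == row_mins[i] == col_maxs[j]:
--                 ans = (i, j)
--     return ans
-- ===== Notes on version B (the rewrite author's own statement) =====
-- stated objective: faster
-- what changed: B precomputes all row minima and column maxima once and tests each cell against them in a single pass, instead of recomputing min(row) per cell and rescanning an ever-growing accumulated column list; Pre_ excludes ragged grids with a row shorter than the first row, on which A raises IndexError.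
-- intended difference: On grids whose last saddle cell is preceded (in row-major order) by some row-minimum cell whose column maximum exceeds the saddle value, A's never-cleared accumulated column_list makes the max test fail, so A returns None or an earlier cell, while B returns that last saddle cell, which is the intended answer. — e.g. on find_saddle_point_coordinates([[5, 2], [6, 9]]): A returns none, B returns some [1, 0]
import Mathlib
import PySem

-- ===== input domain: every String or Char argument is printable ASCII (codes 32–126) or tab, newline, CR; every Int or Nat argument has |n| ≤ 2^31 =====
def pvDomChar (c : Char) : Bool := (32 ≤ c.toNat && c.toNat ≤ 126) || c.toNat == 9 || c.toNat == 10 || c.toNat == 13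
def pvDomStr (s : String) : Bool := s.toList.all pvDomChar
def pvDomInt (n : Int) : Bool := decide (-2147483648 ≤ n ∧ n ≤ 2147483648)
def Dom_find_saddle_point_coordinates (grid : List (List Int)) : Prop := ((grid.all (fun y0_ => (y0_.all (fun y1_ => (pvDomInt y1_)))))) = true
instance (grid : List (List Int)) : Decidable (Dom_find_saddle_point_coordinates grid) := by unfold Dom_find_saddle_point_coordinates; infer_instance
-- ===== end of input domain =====

-- B precomputes all row minima and column maxima once and tests each cell against them in a
-- single pass, instead of recomputing min(row) per cell and rescanning A's ever-growing
-- accumulated column list (faster); on the D_ corner below A's stale accumulated list makes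
-- A miss the last saddle cell, which B returns.

-- ===== PORT A =====
-- grid[i][j] (in-range under Pre_; out of range Python raises IndexError, excluded by Pre_)
def pvEltA (grid : List (List Int)) (i j : Nat) : Int := (grid.getD i []).getD j 0

-- the body of A's j-loop: Python state (row_coordinate, column_coordinate, column_list, n)
def pvStepA (grid : List (List Int)) (i : Nat) (s : Int × Int × List Int × Int) (j : Nat) :
    Int × Int × List Int × Int :=
  let v := pvEltA grid i j
  if PySem.List.min? (grid.getD i []) (fun x => x) = some v then
    -- for k in range(len(grid)): column_list.append(grid[k][j])
    let cl' := (List.range grid.length).foldl (fun acc k => acc ++ [pvEltA grid k j]) s.2.2.1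
    if PySem.List.max? cl' (fun x => x) = some v then ((i : Int), (j : Int), cl', 1)
    else (s.1, s.2.1, cl', s.2.2.2)
  else s

def find_saddle_point_coordinates (grid : List (List Int)) : Option (List Int) :=
  let cols := (grid.getD 0 []).length
  let s := (List.range grid.length).foldl
    (fun s i => (List.range cols).foldl (pvStepA grid i) s)
    ((0 : Int), (0 : Int), ([] : List Int), (0 : Int))
  if s.2.2.2 ≠ 0 then some [s.1, s.2.1] else none

-- ===== PORT B =====
-- row_mins = [min(row) for row in grid]
def pvRowMins (grid : List (List Int)) : List Int :=
  grid.map (fun row => (PySem.List.min? row (fun x => x)).getD 0)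

-- col_maxs = [max(grid[i][j] for i in range(rows)) for j in range(cols)]
def pvColMaxs (grid : List (List Int)) : List Int :=
  (List.range (grid.getD 0 []).length).map (fun j =>
    (PySem.List.max? ((List.range grid.length).map (fun k => (grid.getD k []).getD j 0))
      (fun x => x)).getD 0)

-- the body of B's j-loop
def pvStepB (grid : List (List Int)) (i : Nat) (ans : Option (List Int)) (j : Nat) :
    Option (List Int) :=
  if (grid.getD i []).getD j 0 = (pvRowMins grid).getD i 0 ∧
     (grid.getD i []).getD j 0 = (pvColMaxs grid).getD j 0
  then some [(i : Int), (j : Int)] else ans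

def find_saddle_point_coordinates_alt (grid : List (List Int)) : Option (List Int) :=
  if grid = [] ∨ grid.headD [] = [] then none
  else
    (List.range grid.length).foldl
      (fun ans i => (List.range (grid.getD 0 []).length).foldl (pvStepB grid i) ans)
      none

-- ===== PRECONDITION & SPEC =====
-- helpers for D_ (independent of both ports): r[j], "r[j] is a minimum of row r",
-- the maximum of column j, and the number of columns
def pvA (r : List Int) (j : Nat) : Int := (r.drop j).headD 0
def pvMn (r : List Int) (j : Nat) : Prop := ∀ x ∈ r, pvA r j ≤ x
def pvCM (grid : List (List Int)) (j : Nat) : Int := (grid.map (fun r => pvA r j)).max?.getD 0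
def pvC (grid : List (List Int)) : Nat := (grid.headD []).length

-- Pre_ excludes exactly the inputs on which Python A raises IndexError: non-empty grids
-- with a row shorter than the first row (grid[i][j] / grid[k][j] goes out of range).
def Pre_find_saddle_point_coordinates (grid : List (List Int)) : Prop :=
  ∀ row ∈ grid, (grid.headD []).length ≤ row.length

instance (grid : List (List Int)) : Decidable (Pre_find_saddle_point_coordinates grid) := by
  unfold Pre_find_saddle_point_coordinates; infer_instance

def pvWitness_find_saddle_point_coordinates : List (List Int) := [[1, 2], [3, 4]]

-- On grids whose last saddle cell is preceded (in row-major order) by some row-minimum cell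
-- whose column maximum exceeds the saddle value, A's never-cleared accumulated column_list
-- makes the max test fail, so A returns None or an earlier cell, while B returns that last
-- saddle cell, which is the intended answer.
def D_find_saddle_point_coordinates (grid : List (List Int)) : Prop :=
  ∃ p ∈ grid.zipIdx, ∃ q ∈ grid.zipIdx, ∃ j < pvC grid, ∃ b < pvC grid,
    pvMn p.1 j ∧ pvCM grid j = pvA p.1 j ∧ pvMn q.1 b ∧
    (q.2 < p.2 ∨ q.2 = p.2 ∧ b ≤ j) ∧ pvA p.1 j < pvCM grid b

instance (grid : List (List Int)) : Decidable (D_find_saddle_point_coordinates grid) := by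
  unfold D_find_saddle_point_coordinates pvMn; infer_instance

def Spec_find_saddle_point_coordinates (grid : List (List Int)) (out : Option (List Int)) : Prop := ¬ D_find_saddle_point_coordinates grid → out = find_saddle_point_coordinates_alt grid
instance (grid : List (List Int)) (out : Option (List Int)) : Decidable (Spec_find_saddle_point_coordinates grid out) := by unfold Spec_find_saddle_point_coordinates; infer_instance

def pvDiffWitness_find_saddle_point_coordinates : List (List Int) := [[5, 2], [6, 9]]
def pvDiffWitnessOut_find_saddle_point_coordinates : (Option (List Int)) × (Option (List Int)) :=
  (none, some [1, 0])

-- ===== CLAIM (what is proved, stated in full; the proofs are below) =====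
def Claim_unchanged_find_saddle_point_coordinates : Prop := ∀ (grid : List (List Int)), Dom_find_saddle_point_coordinates grid → Pre_find_saddle_point_coordinates grid → Spec_find_saddle_point_coordinates grid (find_saddle_point_coordinates grid)
def Claim_changed_find_saddle_point_coordinates : Prop := Dom_find_saddle_point_coordinates (pvDiffWitness_find_saddle_point_coordinates) ∧ Pre_find_saddle_point_coordinates (pvDiffWitness_find_saddle_point_coordinates) ∧ D_find_saddle_point_coordinates (pvDiffWitness_find_saddle_point_coordinates) ∧ find_saddle_point_coordinates (pvDiffWitness_find_saddle_point_coordinates) = pvDiffWitnessOut_find_saddle_point_coordinates.1 ∧ find_saddle_point_coordinates_alt (pvDiffWitness_find_saddle_point_coordinates) = pvDiffWitnessOut_find_saddle_point_coordinates.2 ∧ pvDiffWitnessOut_find_saddle_point_coordinates.1 ≠ pvDiffWitnessOut_find_saddle_point_coordinates.2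
def Claim_exact_find_saddle_point_coordinates : Prop := ∀ (grid : List (List Int)), Dom_find_saddle_point_coordinates grid → Pre_find_saddle_point_coordinates grid → D_find_saddle_point_coordinates grid → find_saddle_point_coordinates grid ≠ find_saddle_point_coordinates_alt grid

-- ===== LEMMAS AND PROOFS =====

def pvRow (grid : List (List Int)) (i : Nat) : List Int := (grid.drop i).headD []
def pvElt (grid : List (List Int)) (i j : Nat) : Int := pvA (pvRow grid i) j
def pvIsMin (grid : List (List Int)) (i j : Nat) : Prop := pvMn (pvRow grid i) j
def pvIsMax (grid : List (List Int)) (i j : Nat) : Prop :=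
  ∀ k < grid.length, pvElt grid k j ≤ pvElt grid i j
def pvSaddle (grid : List (List Int)) (i j : Nat) : Prop := pvIsMin grid i j ∧ pvIsMax grid i j
def pvLexLe (p q : Nat × Nat) : Prop := p.1 < q.1 ∨ (p.1 = q.1 ∧ p.2 ≤ q.2)
def pvLexLt (p q : Nat × Nat) : Prop := p.1 < q.1 ∨ (p.1 = q.1 ∧ p.2 < q.2)

lemma pv_row_eq (grid : List (List Int)) (i : Nat) : pvRow grid i = grid.getD i [] := by
  simp [pvRow, List.headD_eq_head?_getD, List.head?_drop, List.getD_eq_getElem?_getD]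

lemma pvElt_eq (grid : List (List Int)) (i j : Nat) : pvElt grid i j = pvEltA grid i j := by
  simp [pvElt, pvA, pvEltA, pv_row_eq, List.headD_eq_head?_getD, List.head?_drop,
    List.getD_eq_getElem?_getD]

lemma pvElt_fold (grid : List (List Int)) (i j : Nat) :
    pvA (grid.getD i []) j = pvElt grid i j := by
  rw [pvElt, pv_row_eq]

lemma pv_row_getElem (grid : List (List Int)) (i : Nat) (hi : i < grid.length) :
    pvRow grid i = grid[i] := by
  rw [pv_row_eq, List.getD_eq_getElem _ _ hi]

lemma pv_zip_mem (grid : List (List Int)) (i : Nat) (hi : i < grid.length) :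
    (grid[i]'hi, i) ∈ grid.zipIdx := by
  rw [List.mem_zipIdx_iff_getElem?]
  simp

lemma pv_zip_elim (grid : List (List Int)) (x : List Int) (i : Nat)
    (h : (x, i) ∈ grid.zipIdx) : i < grid.length ∧ x = pvRow grid i := by
  rw [List.mem_zipIdx_iff_getElem?] at h
  have hi : i < grid.length := by simpa using (List.getElem?_eq_some_iff.mp h).1
  refine ⟨hi, ?_⟩
  rw [pv_row_getElem grid i hi]
  have := List.getElem?_eq_some_iff.mp h
  obtain ⟨_, hx⟩ := this
  exact hx.symm


def pvPairs (R C : Nat) : List (Nat × Nat) :=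
  (List.range R).flatMap (fun i => (List.range C).map (fun j => (i, j)))

-- Bool form of pvSaddle (for filtering the pair list in the proofs)
def pvSadB (grid : List (List Int)) (p : Nat × Nat) : Bool :=
  decide (∀ x ∈ pvRow grid p.1, pvElt grid p.1 p.2 ≤ x) &&
  decide (∀ k < grid.length, pvElt grid k p.2 ≤ pvElt grid p.1 p.2)

lemma pvSadB_iff (grid : List (List Int)) (p : Nat × Nat) :
    pvSadB grid p = true ↔ pvSaddle grid p.1 p.2 := by
  simp [pvSadB, pvSaddle, pvIsMin, pvMn, pvIsMax, pvElt]

def pvOut (s : Int × Int × List Int × Int) : Option (List Int) :=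
  if s.2.2.2 ≠ 0 then some [s.1, s.2.1] else none

-- column j as a list (what A's k-loop appends)
def pvCol (grid : List (List Int)) (j : Nat) : List Int :=
  (List.range grid.length).map (fun k => pvEltA grid k j)

lemma pv_lexLt_of_le_of_ne (p q : Nat × Nat) (h : pvLexLe p q) (hne : p ≠ q) : pvLexLt p q := by
  obtain ⟨a, b⟩ := p; obtain ⟨c, d⟩ := q
  simp only [pvLexLe, pvLexLt] at *
  rcases h with h | ⟨h1, h2⟩
  · exact Or.inl h
  · subst h1
    refine Or.inr ⟨rfl, lt_of_le_of_ne h2 ?_⟩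
    intro hbd; exact hne (by simp [hbd])

lemma pv_lexLt_asymm (p q : Nat × Nat) (h1 : pvLexLt p q) (h2 : pvLexLe q p) : False := by
  obtain ⟨a, b⟩ := p; obtain ⟨c, d⟩ := q
  simp only [pvLexLe, pvLexLt] at *
  omega

lemma pv_foldl_flatMap {α β σ : Type} (l : List α) (f : α → List β) (g : σ → β → σ) (s : σ) :
    (l.flatMap f).foldl g s = l.foldl (fun s a => (f a).foldl g s) s := by
  induction l generalizing s with
  | nil => rfl
  | cons x t ih => simp only [List.flatMap_cons, List.foldl_append, List.foldl_cons, ih]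

lemma pv_nested_eq_pairs {σ : Type} (R C : Nat) (g : σ → Nat × Nat → σ) (s : σ) :
    (List.range R).foldl (fun s i => (List.range C).foldl (fun s j => g s (i, j)) s) s =
      (pvPairs R C).foldl g s := by
  rw [pvPairs, pv_foldl_flatMap]
  simp only [List.foldl_map]

lemma pv_mem_pairs (R C : Nat) (p : Nat × Nat) :
    p ∈ pvPairs R C ↔ p.1 < R ∧ p.2 < C := by
  obtain ⟨i, j⟩ := p
  simp only [pvPairs, List.mem_flatMap, List.mem_map, List.mem_range]
  constructor
  · rintro ⟨a, ha, b, hb, heq⟩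
    obtain ⟨rfl, rfl⟩ : a = i ∧ b = j := by
      constructor <;> [exact congrArg Prod.fst heq; exact congrArg Prod.snd heq]
    exact ⟨ha, hb⟩
  · rintro ⟨hi, hj⟩; exact ⟨i, hi, j, hj, rfl⟩

lemma pv_pairs_pairwise (R C : Nat) : (pvPairs R C).Pairwise pvLexLt := by
  induction R with
  | zero => simp [pvPairs]
  | succ R ih =>
    have hsplit : pvPairs (R + 1) C =
        pvPairs R C ++ (List.range C).map (fun j => (R, j)) := by
      simp [pvPairs, List.range_succ]
    rw [hsplit, List.pairwise_append]
    refine ⟨ih, ?_, ?_⟩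
    · refine List.Pairwise.map _ ?_ List.pairwise_lt_range
      intro a b hab; exact Or.inr ⟨rfl, hab⟩
    · intro p hp q hq
      have hpR : p.1 < R := ((pv_mem_pairs R C p).mp hp).1
      obtain ⟨b, _, rfl⟩ := List.mem_map.mp hq
      exact Or.inl hpR

lemma pv_last_max {α : Type} (r : α → α → Prop) :
    ∀ (l : List α), l.Pairwise r → ∀ (h : l ≠ []) (x : α), x ∈ l →
      x = l.getLast h ∨ r x (l.getLast h) := by
  intro l
  induction l using List.reverseRecOn with
  | nil => intro _ h; exact absurd rfl h
  | append_singleton t y _ =>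
    intro hpw h x hx
    rw [List.getLast_append_singleton]
    rcases List.mem_append.mp hx with hx | hx
    · right
      exact (List.pairwise_append.mp hpw).2.2 x hx y (by simp)
    · left; simpa using hx

lemma pv_split {α : Type} (l : List α) (r : α → α → Prop) (hpw : l.Pairwise r) (p : α)
    (hp : p ∈ l) :
    ∃ b a, l = b ++ p :: a ∧ (∀ q ∈ b, r q p) ∧ (∀ q ∈ a, r p q) ∧
      (∀ q ∈ b, q ∈ l) ∧ (∀ q ∈ a, q ∈ l) := by
  obtain ⟨b, a, rfl⟩ := List.append_of_mem hp
  have h := List.pairwise_append.mp hpw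
  have hcons := List.pairwise_cons.mp h.2.1
  refine ⟨b, a, rfl, ?_, ?_, ?_, ?_⟩
  · intro q hq; exact h.2.2 q hq p List.mem_cons_self
  · intro q hq; exact hcons.1 q hq
  · intro q hq; exact List.mem_append_left _ hq
  · intro q hq; exact List.mem_append_right _ (List.mem_cons_of_mem _ hq)

lemma pv_foldl_inv {σ α : Type} (Inv : σ → Prop) (f : σ → α → σ) (l : List α)
    (hstep : ∀ p ∈ l, ∀ s, Inv s → Inv (f s p)) :
    ∀ s, Inv s → Inv (l.foldl f s) := by
  induction l with
  | nil => intro s h; exact h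
  | cons x t ih =>
    intro s h
    exact ih (fun p hp => hstep p (List.mem_cons_of_mem _ hp)) _ (hstep x List.mem_cons_self s h)

-- membership facts
lemma pv_getD_map {α β : Type} (f : α → β) (l : List α) (i : Nat) (hi : i < l.length)
    (d : β) (d' : α) : (l.map f).getD i d = f (l.getD i d') := by
  rw [List.getD_eq_getElem (l.map f) d (by simpa using hi),
    List.getD_eq_getElem l d' hi, List.getElem_map]

lemma pv_getD_map_range {α : Type} (f : Nat → α) (n j : Nat) (hj : j < n) (d : α) :
    ((List.range n).map f).getD j d = f j := by
  have h := pv_getD_map f (List.range n) j (by simpa using hj) d 0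
  have h2 : (List.range n).getD j 0 = j := by
    rw [List.getD_eq_getElem _ _ (by simpa using hj)]
    simp
  rw [h2] at h
  exact h

lemma pv_row_mem (grid : List (List Int)) (i : Nat) (hi : i < grid.length) :
    grid.getD i [] ∈ grid := by
  rw [List.getD_eq_getElem _ _ hi]
  exact List.getElem_mem hi

lemma pv_elt_mem_row (grid : List (List Int))
    (hpre : Pre_find_saddle_point_coordinates grid)
    (i j : Nat) (hi : i < grid.length) (hj : j < (grid.headD []).length) :
    pvElt grid i j ∈ grid.getD i [] := by
  have hlen : (grid.headD []).length ≤ (grid.getD i []).length :=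
    hpre _ (pv_row_mem grid i hi)
  have hjlen : j < (grid.getD i []).length := lt_of_lt_of_le hj hlen
  rw [pvElt_eq, pvEltA, List.getD_eq_getElem _ _ hjlen]
  exact List.getElem_mem hjlen

lemma pv_mem_col (grid : List (List Int)) (j : Nat) (x : Int) :
    x ∈ pvCol grid j ↔ ∃ k < grid.length, x = pvElt grid k j := by
  simp only [pvCol, List.mem_map, List.mem_range, pvElt_eq]
  constructor
  · rintro ⟨k, hk, rfl⟩; exact ⟨k, hk, rfl⟩
  · rintro ⟨k, hk, rfl⟩; exact ⟨k, hk, rfl⟩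

lemma pv_elt_mem_col (grid : List (List Int)) (i j : Nat) (hi : i < grid.length) :
    pvElt grid i j ∈ pvCol grid j :=
  (pv_mem_col grid j _).mpr ⟨i, hi, rfl⟩

-- A's k-loop builds cl ++ column j
lemma pv_cl_append (grid : List (List Int)) (j : Nat) (cl : List Int) :
    (List.range grid.length).foldl (fun acc k => acc ++ [pvEltA grid k j]) cl =
      cl ++ pvCol grid j := by
  rw [pvCol, PySem.List.foldl_append_singleton_eq_map]

-- "v == min(grid[i])" is pvIsMin
lemma pv_cand_iff (grid : List (List Int)) (hpre : Pre_find_saddle_point_coordinates grid)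
    (i j : Nat) (hi : i < grid.length) (hj : j < (grid.headD []).length) :
    PySem.List.min? (grid.getD i []) (fun x => x) = some (pvElt grid i j) ↔ pvIsMin grid i j := by
  rw [pvIsMin, pvMn, pv_row_eq]
  simp only [pvElt_fold]
  constructor
  · intro h x hx
    have := PySem.List.min?_isMin h x hx
    simpa using this
  · intro h
    obtain ⟨m, hm⟩ : ∃ m, PySem.List.min? (grid.getD i []) (fun x => x) = some m := by
      cases hmin : PySem.List.min? (grid.getD i []) (fun x => x) with
      | none =>
        exfalso
        have hnil := (PySem.List.min?_eq_none_iff _ _).mp hmin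
        have := pv_elt_mem_row grid hpre i j hi hj
        rw [hnil] at this
        exact absurd this (List.not_mem_nil)
      | some m => exact ⟨m, rfl⟩
    have h1 : m ≤ pvElt grid i j := by
      have := PySem.List.min?_isMin hm (pvElt grid i j) (pv_elt_mem_row grid hpre i j hi hj)
      simpa using this
    have h2 : pvElt grid i j ≤ m := h m (PySem.List.min?_mem hm)
    rw [hm, le_antisymm h1 h2]

-- "v == max(cl')" forward: every entry of cl' is ≤ v
lemma pv_max_all_le (cl : List Int) (v : Int)
    (h : PySem.List.max? cl (fun x => x) = some v) : ∀ x ∈ cl, x ≤ v := by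
  intro x hx
  have := PySem.List.max?_isMax h x hx
  simpa using this

-- backward: v a member that dominates everything is the max
lemma pv_max_eq (cl : List Int) (v : Int) (hmem : v ∈ cl) (hle : ∀ x ∈ cl, x ≤ v) :
    PySem.List.max? cl (fun x => x) = some v := by
  obtain ⟨m, hm⟩ : ∃ m, PySem.List.max? cl (fun x => x) = some m := by
    cases hmax : PySem.List.max? cl (fun x => x) with
    | none =>
      exfalso
      have hnil := (PySem.List.max?_eq_none_iff _ _).mp hmax
      rw [hnil] at hmem
      exact absurd hmem (List.not_mem_nil)
    | some m => exact ⟨m, rfl⟩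
  have h1 : v ≤ m := by
    have := PySem.List.max?_isMax hm v hmem
    simpa using this
  have h2 : m ≤ v := hle m (PySem.List.max?_mem hm)
  rw [hm, le_antisymm h2 h1]

lemma pv_headD_drop (l : List Int) (j : Nat) : (l.drop j).headD 0 = l.getD j 0 := by
  simp [List.headD_eq_head?_getD, List.head?_drop, List.getD_eq_getElem?_getD]

lemma pv_colmap_eq (grid : List (List Int)) (j : Nat) :
    grid.map (fun r => pvA r j) = pvCol grid j := by
  simp only [pvA]
  apply List.ext_getElem
  · simp [pvCol]
  · intro k h1 h2
    simp only [List.getElem_map, pvCol, List.getElem_range, pvEltA, pv_headD_drop]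

    congr 1
    rw [List.getD_eq_getElem _ _ (by simpa [pvCol] using h2)]

lemma pv_max?_eq_pysem (l : List Int) : l.max? = PySem.List.max? l (fun x => x) := by
  cases l with
  | nil => rfl
  | cons x t => rw [List.max?_cons', PySem.List.max?_id_cons]

lemma pv_CM_eq (grid : List (List Int)) (j : Nat) :
    pvCM grid j = (PySem.List.max? (pvCol grid j) (fun x => x)).getD 0 := by
  rw [pvCM, pv_colmap_eq, pv_max?_eq_pysem]

lemma pv_col_max_some (grid : List (List Int)) (j : Nat) (hR : 0 < grid.length) :
    ∃ m, PySem.List.max? (pvCol grid j) (fun x => x) = some m := by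
  cases hmax : PySem.List.max? (pvCol grid j) (fun x => x) with
  | none =>
    exfalso
    have hnil := (PySem.List.max?_eq_none_iff _ _).mp hmax
    have : pvElt grid 0 j ∈ pvCol grid j := pv_elt_mem_col grid 0 j hR
    rw [hnil] at this
    exact absurd this (List.not_mem_nil)
  | some m => exact ⟨m, rfl⟩

lemma pv_le_CM (grid : List (List Int)) (k b : Nat) (hk : k < grid.length) :
    pvElt grid k b ≤ pvCM grid b := by
  obtain ⟨m, hm⟩ := pv_col_max_some grid b (by omega)
  rw [pv_CM_eq, hm, Option.getD_some]
  have := PySem.List.max?_isMax hm (pvElt grid k b) (pv_elt_mem_col grid k b hk)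
  simpa using this

lemma pv_CM_gt (grid : List (List Int)) (v : Int) (b : Nat) (hR : 0 < grid.length)
    (h : v < pvCM grid b) : ∃ k < grid.length, v < pvElt grid k b := by
  obtain ⟨m, hm⟩ := pv_col_max_some grid b hR
  rw [pv_CM_eq, hm, Option.getD_some] at h
  obtain ⟨k, hk, rfl⟩ := (pv_mem_col grid b m).mp (PySem.List.max?_mem hm)
  exact ⟨k, hk, h⟩

lemma pv_CM_iff (grid : List (List Int)) (i j : Nat) (hi : i < grid.length) :
    pvCM grid j = pvElt grid i j ↔ pvIsMax grid i j := by
  constructor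
  · intro h k hk
    have := pv_le_CM grid k j hk
    omega
  · intro h
    rw [pv_CM_eq]
    have hmax : PySem.List.max? (pvCol grid j) (fun x => x) = some (pvElt grid i j) := by
      apply pv_max_eq _ _ (pv_elt_mem_col grid i j hi)
      intro x hx
      obtain ⟨k, hk, rfl⟩ := (pv_mem_col grid j x).mp hx
      exact h k hk
    rw [hmax, Option.getD_some]

-- B's cell test is exactly "saddle" (under Pre_ and in-range indices)
lemma pv_stepB_cond_iff (grid : List (List Int))
    (hpre : Pre_find_saddle_point_coordinates grid)
    (i j : Nat) (hi : i < grid.length) (hj : j < (grid.headD []).length) :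
    ((grid.getD i []).getD j 0 = (pvRowMins grid).getD i 0 ∧
     (grid.getD i []).getD j 0 = (pvColMaxs grid).getD j 0) ↔ pvSaddle grid i j := by
  have hcols0 : grid.getD 0 [] = grid.headD [] := by cases grid <;> rfl
  -- rowMins entry
  have hrm : (pvRowMins grid).getD i 0 =
      (PySem.List.min? (grid.getD i []) (fun x => x)).getD 0 := by
    rw [pvRowMins, pv_getD_map _ _ _ hi 0 []]
  have hcm : (pvColMaxs grid).getD j 0 =
      (PySem.List.max? (pvCol grid j) (fun x => x)).getD 0 := by
    rw [pvColMaxs, hcols0, pv_getD_map_range _ _ _ hj 0]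
    rfl
  have hvrow := pv_elt_mem_row grid hpre i j hi hj
  have hvcol := pv_elt_mem_col grid i j hi
  constructor
  · rintro ⟨h1, h2⟩
    rw [hrm] at h1; rw [hcm] at h2
    obtain ⟨m, hm⟩ : ∃ m, PySem.List.min? (grid.getD i []) (fun x => x) = some m := by
      cases hmin : PySem.List.min? (grid.getD i []) (fun x => x) with
      | none =>
        exfalso
        have hnil := (PySem.List.min?_eq_none_iff _ _).mp hmin
        rw [hnil] at hvrow; exact absurd hvrow (List.not_mem_nil)
      | some m => exact ⟨m, rfl⟩
    obtain ⟨M, hM⟩ : ∃ M, PySem.List.max? (pvCol grid j) (fun x => x) = some M := by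
      cases hmax : PySem.List.max? (pvCol grid j) (fun x => x) with
      | none =>
        exfalso
        have hnil := (PySem.List.max?_eq_none_iff _ _).mp hmax
        rw [hnil] at hvcol; exact absurd hvcol (List.not_mem_nil)
      | some M => exact ⟨M, rfl⟩
    rw [hm] at h1; rw [hM] at h2
    simp only [Option.getD_some] at h1 h2
    constructor
    · intro x hx
      rw [pv_row_eq] at hx
      have hle := PySem.List.min?_isMin hm x hx
      have hv : pvElt grid i j = m := by rw [pvElt_eq]; exact h1
      show pvElt grid i j ≤ x
      rw [hv]; simpa using hle
    · intro k hk
      have hle := PySem.List.max?_isMax hM (pvElt grid k j) (pv_elt_mem_col grid k j hk)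
      have hv : pvElt grid i j = M := by rw [pvElt_eq]; exact h2
      rw [hv]; simpa using hle
  · rintro ⟨hmin, hmax⟩
    have h1 := (pv_cand_iff grid hpre i j hi hj).mpr hmin
    have h2 : PySem.List.max? (pvCol grid j) (fun x => x) = some (pvElt grid i j) := by
      apply pv_max_eq _ _ hvcol
      intro x hx
      obtain ⟨k, hk, rfl⟩ := (pv_mem_col grid j x).mp hx
      exact hmax k hk
    refine ⟨?_, ?_⟩
    · rw [hrm, h1, Option.getD_some, pvElt_eq]; rfl
    · rw [hcm, h2, Option.getD_some, pvElt_eq]; rfl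

-- A's accept at an in-range cell implies that cell is a saddle
lemma pv_accept_saddle (grid : List (List Int))
    (hpre : Pre_find_saddle_point_coordinates grid)
    (i j : Nat) (hi : i < grid.length) (hj : j < (grid.headD []).length) (cl : List Int)
    (hcand : PySem.List.min? (grid.getD i []) (fun x => x) = some (pvEltA grid i j))
    (hacc : PySem.List.max? (cl ++ pvCol grid j) (fun x => x) = some (pvEltA grid i j)) :
    pvSaddle grid i j := by
  have hEq : pvEltA grid i j = pvElt grid i j := (pvElt_eq grid i j).symm
  refine ⟨(pv_cand_iff grid hpre i j hi hj).mp (by rw [← hEq]; exact hcand), ?_⟩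
  intro k hk
  have hx : pvElt grid k j ∈ cl ++ pvCol grid j :=
    List.mem_append_right _ (pv_elt_mem_col grid k j hk)
  have := pv_max_all_le _ _ hacc _ hx
  rwa [hEq] at this

-- out is unchanged unless the accept test fires
lemma pv_stepA_out (grid : List (List Int)) (i j : Nat) (s : Int × Int × List Int × Int) :
    pvOut (pvStepA grid i s j) = pvOut s ∨
      (PySem.List.min? (grid.getD i []) (fun x => x) = some (pvEltA grid i j) ∧
       PySem.List.max? (s.2.2.1 ++ pvCol grid j) (fun x => x) = some (pvEltA grid i j) ∧
       pvOut (pvStepA grid i s j) = some [(i : Int), (j : Int)]) := by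
  rw [pvStepA]
  simp only [pv_cl_append]
  split_ifs with h1 h2
  · exact Or.inr ⟨h1, h2, by simp [pvOut]⟩
  · left; simp [pvOut]
  · left; rfl

-- the column list never shrinks; it grows only on a row-minimum cell
lemma pv_stepA_cl (grid : List (List Int)) (i j : Nat) (s : Int × Int × List Int × Int) :
    (pvStepA grid i s j).2.2.1 = s.2.2.1 ∨
      (PySem.List.min? (grid.getD i []) (fun x => x) = some (pvEltA grid i j) ∧
       (pvStepA grid i s j).2.2.1 = s.2.2.1 ++ pvCol grid j) := by
  rw [pvStepA]
  simp only [pv_cl_append]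
  split_ifs with h1 h2
  · exact Or.inr ⟨h1, rfl⟩
  · exact Or.inr ⟨h1, rfl⟩
  · exact Or.inl rfl

-- on a row-minimum cell the column really is appended
lemma pv_stepA_cand_cl (grid : List (List Int)) (i j : Nat) (s : Int × Int × List Int × Int)
    (hcand : PySem.List.min? (grid.getD i []) (fun x => x) = some (pvEltA grid i j)) :
    (pvStepA grid i s j).2.2.1 = s.2.2.1 ++ pvCol grid j := by
  rw [pvStepA]
  simp only [pv_cl_append]
  rw [if_pos hcand]
  split_ifs <;> rfl

lemma pv_lexLe_refl (p : Nat × Nat) : pvLexLe p p := Or.inr ⟨rfl, le_refl _⟩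

lemma pv_lexLe_of_lt (p q : Nat × Nat) (h : pvLexLt p q) : pvLexLe p q := by
  rcases h with h | ⟨h1, h2⟩
  · exact Or.inl h
  · exact Or.inr ⟨h1, le_of_lt h2⟩

lemma pv_ne_of_lexLt (p q : Nat × Nat) (h : pvLexLt p q) : p ≠ q := by
  rintro rfl
  exact pv_lexLt_asymm p p h (pv_lexLe_refl p)

lemma pv_lexLe_trans (p q r : Nat × Nat) (h1 : pvLexLe p q) (h2 : pvLexLe q r) :
    pvLexLe p r := by
  simp only [pvLexLe] at *
  omega

-- any two saddle cells carry the same value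
lemma pv_saddle_val_eq (grid : List (List Int))
    (hpre : Pre_find_saddle_point_coordinates grid)
    (i j i' j' : Nat) (hi : i < grid.length) (hj : j < (grid.headD []).length)
    (hi' : i' < grid.length) (hj' : j' < (grid.headD []).length)
    (h : pvSaddle grid i j) (h' : pvSaddle grid i' j') :
    pvElt grid i j = pvElt grid i' j' := by
  have h1 : pvElt grid i j ≤ pvElt grid i j' := by
    apply h.1
    rw [pv_row_eq]
    exact pv_elt_mem_row grid hpre i j' hi hj'
  have h2 : pvElt grid i j' ≤ pvElt grid i' j' := h'.2 i hi
  have h3 : pvElt grid i' j' ≤ pvElt grid i' j := by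
    apply h'.1
    rw [pv_row_eq]
    exact pv_elt_mem_row grid hpre i' j hi' hj
  have h4 : pvElt grid i' j ≤ pvElt grid i j := h.2 i' hi'
  omega

-- A as a fold over the row-major pair list
lemma pv_A_eq (grid : List (List Int)) :
    find_saddle_point_coordinates grid =
      pvOut ((pvPairs grid.length (grid.headD []).length).foldl
        (fun s p => pvStepA grid p.1 s p.2) ((0 : Int), (0 : Int), ([] : List Int), (0 : Int))) := by
  have hcols0 : grid.getD 0 [] = grid.headD [] := by cases grid <;> rfl
  rw [find_saddle_point_coordinates]
  simp only [hcols0]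
  rw [pv_nested_eq_pairs grid.length (grid.headD []).length
    (fun s p => pvStepA grid p.1 s p.2)]
  rfl

-- B as a fold over the row-major pair list (when the guard is off)
lemma pv_B_eq (grid : List (List Int)) (hg : ¬(grid = [] ∨ grid.headD [] = [])) :
    find_saddle_point_coordinates_alt grid =
      (pvPairs grid.length (grid.headD []).length).foldl
        (fun ans p => pvStepB grid p.1 ans p.2) none := by
  have hcols0 : grid.getD 0 [] = grid.headD [] := by cases grid <;> rfl
  rw [find_saddle_point_coordinates_alt, if_neg hg]
  simp only [hcols0]
  rw [pv_nested_eq_pairs grid.length (grid.headD []).length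
    (fun ans p => pvStepB grid p.1 ans p.2)]

-- no saddle: both return none
lemma pv_A_none (grid : List (List Int)) (hpre : Pre_find_saddle_point_coordinates grid)
    (hns : ∀ i < grid.length, ∀ j < (grid.headD []).length, ¬ pvSaddle grid i j) :
    find_saddle_point_coordinates grid = none := by
  rw [pv_A_eq]
  have hstep : ∀ p ∈ pvPairs grid.length (grid.headD []).length, ∀ s, pvOut s = none →
      pvOut (pvStepA grid p.1 s p.2) = none := by
    intro p hp s hs
    obtain ⟨hi, hj⟩ := (pv_mem_pairs _ _ p).mp hp
    rcases pv_stepA_out grid p.1 p.2 s with h | ⟨hc, ha, _⟩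
    · rw [h]; exact hs
    · exact absurd (pv_accept_saddle grid hpre p.1 p.2 hi hj s.2.2.1 hc ha) (hns p.1 hi p.2 hj)
  exact pv_foldl_inv _ _ _ hstep _ (by decide)

lemma pv_B_none (grid : List (List Int))
    (hns : ∀ i < grid.length, ∀ j < (grid.headD []).length, ¬ pvSaddle grid i j)
    (hpre : Pre_find_saddle_point_coordinates grid) :
    find_saddle_point_coordinates_alt grid = none := by
  by_cases hg : grid = [] ∨ grid.headD [] = []
  · rw [find_saddle_point_coordinates_alt, if_pos hg]
  · rw [pv_B_eq grid hg]
    refine pv_foldl_inv (fun ans => ans = none) _ _ ?_ _ rfl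
    intro p hp s hs
    obtain ⟨hi, hj⟩ := (pv_mem_pairs _ _ p).mp hp
    rw [pvStepB]
    split_ifs with hcond
    · exact absurd ((pv_stepB_cond_iff grid hpre p.1 p.2 hi hj).mp hcond) (hns p.1 hi p.2 hj)
    · exact hs

-- B returns the last saddle cell
lemma pv_B_last (grid : List (List Int)) (hpre : Pre_find_saddle_point_coordinates grid)
    (i j : Nat) (hi : i < grid.length) (hj : j < (grid.headD []).length)
    (hsad : pvSaddle grid i j)
    (hlast : ∀ i2 < grid.length, ∀ j2 < (grid.headD []).length,
        pvSaddle grid i2 j2 → pvLexLe (i2, j2) (i, j)) :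
    find_saddle_point_coordinates_alt grid = some [(i : Int), (j : Int)] := by
  have hg : ¬(grid = [] ∨ grid.headD [] = []) := by
    rintro (h | h)
    · rw [h] at hi; exact absurd hi (by simp)
    · rw [h] at hj; exact absurd hj (by simp)
  rw [pv_B_eq grid hg]
  obtain ⟨b, a, hdecomp, _, hafter, _, hamem⟩ :=
    pv_split _ pvLexLt (pv_pairs_pairwise grid.length (grid.headD []).length) (i, j)
      ((pv_mem_pairs _ _ (i, j)).mpr ⟨hi, hj⟩)
  rw [hdecomp, List.foldl_append, List.foldl_cons]
  have hstep : pvStepB grid i (b.foldl (fun ans p => pvStepB grid p.1 ans p.2) none) j =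
      some [(i : Int), (j : Int)] := by
    rw [pvStepB, if_pos ((pv_stepB_cond_iff grid hpre i j hi hj).mpr hsad)]
  rw [hstep]
  refine pv_foldl_inv (fun ans => ans = some [(i : Int), (j : Int)]) _ _ ?_ _ rfl
  intro p hp s hs
  obtain ⟨hpi, hpj⟩ := (pv_mem_pairs _ _ p).mp (hamem p hp)
  rw [pvStepB]
  split_ifs with hcond
  · exfalso
    have hsadp := (pv_stepB_cond_iff grid hpre p.1 p.2 hpi hpj).mp hcond
    exact pv_lexLt_asymm (i, j) p (hafter p hp) (hlast p.1 hpi p.2 hpj hsadp)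
  · exact hs

-- among the saddle cells there is a row-major-last one
lemma pv_exists_last (grid : List (List Int))
    (h : ∃ i < grid.length, ∃ j < (grid.headD []).length, pvSaddle grid i j) :
    ∃ i < grid.length, ∃ j < (grid.headD []).length, pvSaddle grid i j ∧
      ∀ i2 < grid.length, ∀ j2 < (grid.headD []).length, pvSaddle grid i2 j2 →
        pvLexLe (i2, j2) (i, j) := by
  obtain ⟨i0, hi0, j0, hj0, hsad0⟩ := h
  have hmem0 : (i0, j0) ∈ (pvPairs grid.length (grid.headD []).length).filter
      (pvSadB grid) := by
    rw [List.mem_filter]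
    exact ⟨(pv_mem_pairs _ _ _).mpr ⟨hi0, hj0⟩, (pvSadB_iff grid (i0, j0)).mpr hsad0⟩
  have hne : (pvPairs grid.length (grid.headD []).length).filter
      (pvSadB grid) ≠ [] := List.ne_nil_of_mem hmem0
  set pstar := ((pvPairs grid.length (grid.headD []).length).filter
      (pvSadB grid)).getLast hne with hpstar
  have hpw : ((pvPairs grid.length (grid.headD []).length).filter
      (pvSadB grid)).Pairwise pvLexLt :=
    List.Pairwise.sublist List.filter_sublist (pv_pairs_pairwise _ _)
  have hpmem : pstar ∈ (pvPairs grid.length (grid.headD []).length).filter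
      (pvSadB grid) := List.getLast_mem hne
  have hpsad : pvSaddle grid pstar.1 pstar.2 :=
    (pvSadB_iff grid pstar).mp (List.mem_filter.mp hpmem).2
  have hpi : pstar.1 < grid.length := ((pv_mem_pairs _ _ _).mp (List.mem_filter.mp hpmem).1).1
  have hpj : pstar.2 < (grid.headD []).length :=
    ((pv_mem_pairs _ _ _).mp (List.mem_filter.mp hpmem).1).2
  refine ⟨pstar.1, hpi, pstar.2, hpj, hpsad, ?_⟩
  intro i2 hi2 j2 hj2 hsad2
  have hm2 : (i2, j2) ∈ (pvPairs grid.length (grid.headD []).length).filter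
      (pvSadB grid) := by
    rw [List.mem_filter]
    exact ⟨(pv_mem_pairs _ _ _).mpr ⟨hi2, hj2⟩, (pvSadB_iff grid (i2, j2)).mpr hsad2⟩
  rcases pv_last_max pvLexLt _ hpw hne (i2, j2) hm2 with h | h
  · rw [h, ← hpstar]; exact pv_lexLe_refl _
  · rw [← hpstar] at h; exact pv_lexLe_of_lt _ _ h

-- coordinates-as-Int-lists are injective
lemma pv_coord_ne (p : Nat × Nat) (i j : Nat) (hne : p ≠ (i, j)) :
    some [(p.1 : Int), (p.2 : Int)] ≠ some [(i : Int), (j : Int)] := by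
  intro h
  apply hne
  obtain ⟨a, b⟩ := p
  simp only [Option.some.injEq, List.cons.injEq, and_true, Int.natCast_inj] at h
  simp [h.1, h.2]

-- A returns the last saddle cell when no earlier row-minimum cell has a larger column max
lemma pv_A_last (grid : List (List Int)) (hpre : Pre_find_saddle_point_coordinates grid)
    (i j : Nat) (hi : i < grid.length) (hj : j < (grid.headD []).length)
    (hsad : pvSaddle grid i j)
    (hlast : ∀ i2 < grid.length, ∀ j2 < (grid.headD []).length,
        pvSaddle grid i2 j2 → pvLexLe (i2, j2) (i, j))
    (hno : ∀ a < grid.length, ∀ b < (grid.headD []).length, pvIsMin grid a b →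
        pvLexLe (a, b) (i, j) → ∀ k < grid.length, pvElt grid k b ≤ pvElt grid i j) :
    find_saddle_point_coordinates grid = some [(i : Int), (j : Int)] := by
  rw [pv_A_eq]
  obtain ⟨b, a, hdecomp, hbefore, hafter, hbmem, hamem⟩ :=
    pv_split _ pvLexLt (pv_pairs_pairwise grid.length (grid.headD []).length) (i, j)
      ((pv_mem_pairs _ _ (i, j)).mpr ⟨hi, hj⟩)
  rw [hdecomp, List.foldl_append, List.foldl_cons]
  set s1 := b.foldl (fun s p => pvStepA grid p.1 s p.2)
    ((0 : Int), (0 : Int), ([] : List Int), (0 : Int)) with hs1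
  -- every entry accumulated before (i, j) is ≤ the saddle value
  have hInv1 : ∀ x ∈ s1.2.2.1, x ≤ pvElt grid i j := by
    rw [hs1]
    have hstep : ∀ p ∈ b, ∀ s : Int × Int × List Int × Int,
        (∀ x ∈ s.2.2.1, x ≤ pvElt grid i j) →
        (∀ x ∈ (pvStepA grid p.1 s p.2).2.2.1, x ≤ pvElt grid i j) := by
      intro p hp s hs x hx
      obtain ⟨hpi, hpj⟩ := (pv_mem_pairs _ _ p).mp (hbmem p hp)
      rcases pv_stepA_cl grid p.1 p.2 s with h | ⟨hc, h⟩
      · rw [h] at hx; exact hs x hx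
      · rw [h] at hx
        rcases List.mem_append.mp hx with hx | hx
        · exact hs x hx
        · obtain ⟨k, hk, rfl⟩ := (pv_mem_col grid p.2 x).mp hx
          have hmin : pvIsMin grid p.1 p.2 :=
            (pv_cand_iff grid hpre p.1 p.2 hpi hpj).mp (by rw [pvElt_eq]; exact hc)
          exact hno p.1 hpi p.2 hpj hmin (pv_lexLe_of_lt _ _ (hbefore p hp)) k hk
    exact pv_foldl_inv _ _ _ hstep _ (by intro x hx; exact absurd hx (List.not_mem_nil))
  -- the accept test fires at (i, j)
  have hcand : PySem.List.min? (grid.getD i []) (fun x => x) = some (pvEltA grid i j) := by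
    have h := (pv_cand_iff grid hpre i j hi hj).mpr hsad.1
    rwa [pvElt_eq] at h
  have hmax : PySem.List.max? (s1.2.2.1 ++ pvCol grid j) (fun x => x) =
      some (pvEltA grid i j) := by
    apply pv_max_eq
    · rw [← pvElt_eq]
      exact List.mem_append_right _ (pv_elt_mem_col grid i j hi)
    · intro x hx
      rw [← pvElt_eq]
      rcases List.mem_append.mp hx with hx | hx
      · exact hInv1 x hx
      · obtain ⟨k, hk, rfl⟩ := (pv_mem_col grid j x).mp hx
        exact hsad.2 k hk
  have hstepij : pvOut (pvStepA grid i s1 j) = some [(i : Int), (j : Int)] := by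
    rw [pvStepA]
    simp only [pv_cl_append]
    rw [if_pos hcand, if_pos hmax]
    simp [pvOut]
  refine pv_foldl_inv (fun s => pvOut s = some [(i : Int), (j : Int)]) _ _ ?_ _ hstepij
  intro p hp s hs
  obtain ⟨hpi, hpj⟩ := (pv_mem_pairs _ _ p).mp (hamem p hp)
  rcases pv_stepA_out grid p.1 p.2 s with h | ⟨hc, ha, _⟩
  · rw [h]; exact hs
  · exfalso
    have hsadp := pv_accept_saddle grid hpre p.1 p.2 hpi hpj s.2.2.1 hc ha
    exact pv_lexLt_asymm (i, j) p (hafter p hp) (hlast p.1 hpi p.2 hpj hsadp)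

-- A never returns the last saddle cell when an earlier row-minimum cell has a larger column max
lemma pv_A_ne (grid : List (List Int)) (hpre : Pre_find_saddle_point_coordinates grid)
    (i j : Nat) (hi : i < grid.length) (hj : j < (grid.headD []).length)
    (q : Nat × Nat) (hqi : q.1 < grid.length) (hqj : q.2 < (grid.headD []).length)
    (hqmin : pvIsMin grid q.1 q.2) (hqlt : pvLexLt q (i, j))
    (hbig : ∃ k < grid.length, pvElt grid i j < pvElt grid k q.2) :
    find_saddle_point_coordinates grid ≠ some [(i : Int), (j : Int)] := by
  rw [pv_A_eq]
  obtain ⟨b, a, hdecomp, hbefore, hafter, hbmem, hamem⟩ :=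
    pv_split _ pvLexLt (pv_pairs_pairwise grid.length (grid.headD []).length) (i, j)
      ((pv_mem_pairs _ _ (i, j)).mpr ⟨hi, hj⟩)
  -- q sits strictly before (i, j)
  have hqb : q ∈ b := by
    have hqmem : q ∈ pvPairs grid.length (grid.headD []).length :=
      (pv_mem_pairs _ _ q).mpr ⟨hqi, hqj⟩
    rw [hdecomp] at hqmem
    rcases List.mem_append.mp hqmem with h | h
    · exact h
    · rcases List.mem_cons.mp h with h | h
      · exact absurd h (pv_ne_of_lexLt q (i, j) hqlt)
      · exact absurd (pv_lexLe_of_lt _ _ (hafter q h)) (fun hle => pv_lexLt_asymm q _ hqlt hle)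
  have hbpw : b.Pairwise pvLexLt := by
    have := pv_pairs_pairwise grid.length (grid.headD []).length
    rw [hdecomp] at this
    exact (List.pairwise_append.mp this).1
  obtain ⟨b1, b2, hbdecomp, _, _, hb1mem, hb2mem⟩ := pv_split b pvLexLt hbpw q hqb
  rw [hdecomp, hbdecomp, List.foldl_append, List.foldl_append, List.foldl_cons,
    List.foldl_cons]
  obtain ⟨k0, hk0, hk0big⟩ := hbig
  -- invariants
  have hJ1step : ∀ p : Nat × Nat, p ≠ (i, j) → ∀ s : Int × Int × List Int × Int,
      pvOut s ≠ some [(i : Int), (j : Int)] →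
      pvOut (pvStepA grid p.1 s p.2) ≠ some [(i : Int), (j : Int)] := by
    intro p hpne s hs
    rcases pv_stepA_out grid p.1 p.2 s with h | ⟨_, _, h⟩
    · rw [h]; exact hs
    · rw [h]; exact pv_coord_ne p i j hpne
  have hJ2step : ∀ p : Nat × Nat, p ≠ (i, j) → ∀ s : Int × Int × List Int × Int,
      (pvOut s ≠ some [(i : Int), (j : Int)] ∧ ∃ x ∈ s.2.2.1, pvElt grid i j < x) →
      (pvOut (pvStepA grid p.1 s p.2) ≠ some [(i : Int), (j : Int)] ∧
        ∃ x ∈ (pvStepA grid p.1 s p.2).2.2.1, pvElt grid i j < x) := by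
    intro p hpne s hs
    refine ⟨hJ1step p hpne s hs.1, ?_⟩
    obtain ⟨x, hx, hxgt⟩ := hs.2
    rcases pv_stepA_cl grid p.1 p.2 s with h | ⟨_, h⟩
    · exact ⟨x, by rw [h]; exact hx, hxgt⟩
    · exact ⟨x, by rw [h]; exact List.mem_append_left _ hx, hxgt⟩
  -- through b1: the answer is never [i, j]
  have h1 : pvOut (b1.foldl (fun s p => pvStepA grid p.1 s p.2)
      ((0 : Int), (0 : Int), ([] : List Int), (0 : Int))) ≠ some [(i : Int), (j : Int)] := by
    refine pv_foldl_inv (fun s => pvOut s ≠ some [(i : Int), (j : Int)]) _ _ ?_ _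
      (by simp [pvOut])
    intro p hp s hs
    exact hJ1step p (pv_ne_of_lexLt p (i, j) (hbefore p (hb1mem p hp))) s hs
  -- the q step drops a too-large entry into the column list
  have h2 : ∀ s : Int × Int × List Int × Int, pvOut s ≠ some [(i : Int), (j : Int)] →
      (pvOut (pvStepA grid q.1 s q.2) ≠ some [(i : Int), (j : Int)] ∧
        ∃ x ∈ (pvStepA grid q.1 s q.2).2.2.1, pvElt grid i j < x) := by
    intro s hs
    have hcand : PySem.List.min? (grid.getD q.1 []) (fun x => x) =
        some (pvEltA grid q.1 q.2) := by
      have h := (pv_cand_iff grid hpre q.1 q.2 hqi hqj).mpr hqmin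
      rwa [pvElt_eq] at h
    refine ⟨hJ1step q (pv_ne_of_lexLt q (i, j) hqlt) s hs, ?_⟩
    refine ⟨pvElt grid k0 q.2, ?_, hk0big⟩
    rw [pv_stepA_cand_cl grid q.1 q.2 s hcand]
    exact List.mem_append_right _ (pv_elt_mem_col grid k0 q.2 hk0)
  -- through b2
  have h3 : ∀ s : Int × Int × List Int × Int,
      (pvOut s ≠ some [(i : Int), (j : Int)] ∧ ∃ x ∈ s.2.2.1, pvElt grid i j < x) →
      (pvOut (b2.foldl (fun s p => pvStepA grid p.1 s p.2) s) ≠ some [(i : Int), (j : Int)] ∧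
        ∃ x ∈ (b2.foldl (fun s p => pvStepA grid p.1 s p.2) s).2.2.1, pvElt grid i j < x) := by
    intro s hs
    refine pv_foldl_inv (fun s => pvOut s ≠ some [(i : Int), (j : Int)] ∧
      ∃ x ∈ s.2.2.1, pvElt grid i j < x) _ _ ?_ _ hs
    intro p hp s' hs'
    exact hJ2step p (pv_ne_of_lexLt p (i, j) (hbefore p (hb2mem p hp))) s' hs'
  -- at (i, j) the accept test cannot fire
  have h4 : ∀ s : Int × Int × List Int × Int,
      (pvOut s ≠ some [(i : Int), (j : Int)] ∧ ∃ x ∈ s.2.2.1, pvElt grid i j < x) →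
      (pvOut (pvStepA grid i s j) ≠ some [(i : Int), (j : Int)] ∧
        ∃ x ∈ (pvStepA grid i s j).2.2.1, pvElt grid i j < x) := by
    intro s hs
    refine ⟨?_, ?_⟩
    · rcases pv_stepA_out grid i j s with h | ⟨_, hacc, _⟩
      · rw [h]; exact hs.1
      · exfalso
        obtain ⟨x, hx, hxgt⟩ := hs.2
        have := pv_max_all_le _ _ hacc x (List.mem_append_left _ hx)
        rw [pvElt_eq grid i j] at hxgt
        omega
    · obtain ⟨x, hx, hxgt⟩ := hs.2
      rcases pv_stepA_cl grid i j s with h | ⟨_, h⟩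
      · exact ⟨x, by rw [h]; exact hx, hxgt⟩
      · exact ⟨x, by rw [h]; exact List.mem_append_left _ hx, hxgt⟩
  -- through a
  have h5 : ∀ s : Int × Int × List Int × Int,
      (pvOut s ≠ some [(i : Int), (j : Int)] ∧ ∃ x ∈ s.2.2.1, pvElt grid i j < x) →
      (pvOut (a.foldl (fun s p => pvStepA grid p.1 s p.2) s) ≠ some [(i : Int), (j : Int)] ∧
        ∃ x ∈ (a.foldl (fun s p => pvStepA grid p.1 s p.2) s).2.2.1, pvElt grid i j < x) := by
    intro s hs
    refine pv_foldl_inv (fun s => pvOut s ≠ some [(i : Int), (j : Int)] ∧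
      ∃ x ∈ s.2.2.1, pvElt grid i j < x) _ _ ?_ _ hs
    intro p hp s' hs'
    exact hJ2step p (Ne.symm (pv_ne_of_lexLt (i, j) p (hafter p hp))) s' hs'
  exact (h5 _ (h4 _ (h3 _ (h2 _ h1)))).1

-- ===== VERDICT (by name: the statement is the Claim_ definition above) =====
theorem find_saddle_point_coordinates_spec : Claim_unchanged_find_saddle_point_coordinates := by
  intro grid _ hpre
  unfold Spec_find_saddle_point_coordinates
  intro hnD
  by_cases hs : ∃ i < grid.length, ∃ j < (grid.headD []).length, pvSaddle grid i j
  · obtain ⟨i, hpi, j, hpj, hpsad, hlast⟩ := pv_exists_last grid hs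
    by_cases hint : ∃ a < grid.length, ∃ b < (grid.headD []).length,
        pvIsMin grid a b ∧ pvLexLe (a, b) (i, j) ∧
        ∃ k < grid.length, pvElt grid i j < pvElt grid k b
    · exfalso
      apply hnD
      obtain ⟨a, ha, b, hb, hmin, hle, k, hk, hgt⟩ := hint
      refine ⟨(grid[i]'hpi, i), pv_zip_mem grid i hpi, (grid[a]'ha, a), pv_zip_mem grid a ha,
        j, hpj, b, hb, ?_, ?_, ?_, ?_, ?_⟩
      · rw [← pv_row_getElem grid i hpi]; exact hpsad.1
      · rw [← pv_row_getElem grid i hpi]; exact (pv_CM_iff grid i j hpi).mpr hpsad.2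
      · rw [← pv_row_getElem grid a ha]; exact hmin
      · exact hle
      · rw [← pv_row_getElem grid i hpi]
        exact lt_of_lt_of_le hgt (pv_le_CM grid k b hk)
    · push Not at hint
      have hno : ∀ a < grid.length, ∀ b < (grid.headD []).length, pvIsMin grid a b →
          pvLexLe (a, b) (i, j) → ∀ k < grid.length,
          pvElt grid k b ≤ pvElt grid i j := by
        intro a ha b hb hmin hle k hk
        exact hint a ha b hb hmin hle k hk
      rw [pv_A_last grid hpre i j hpi hpj hpsad hlast hno,
        pv_B_last grid hpre i j hpi hpj hpsad hlast]
  · push Not at hs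
    have hns : ∀ i < grid.length, ∀ j < (grid.headD []).length, ¬ pvSaddle grid i j := by
      intro i hi j hj hsad
      exact hs i hi j hj hsad
    rw [pv_A_none grid hpre hns, pv_B_none grid hns hpre]

theorem find_saddle_point_coordinates_changed : Claim_changed_find_saddle_point_coordinates := by
  unfold Claim_changed_find_saddle_point_coordinates; decide

theorem find_saddle_point_coordinates_tight : Claim_exact_find_saddle_point_coordinates := by
  intro grid _ hpre hD
  obtain ⟨⟨x, i⟩, hp, ⟨y, a0⟩, hq, j, hj, b0, hb0, hmn1, hcm, hmn2, hlex, hgtA⟩ := hD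
  obtain ⟨hi, rfl⟩ := pv_zip_elim grid x i hp
  obtain ⟨ha0, rfl⟩ := pv_zip_elim grid y a0 hq
  have hj : j < (grid.headD []).length := hj
  have hb0 : b0 < (grid.headD []).length := hb0
  have hminij : pvIsMin grid i j := hmn1
  have hcm' : pvCM grid j = pvElt grid i j := hcm
  have hmin0 : pvIsMin grid a0 b0 := hmn2
  have hle0 : a0 < i ∨ a0 = i ∧ b0 ≤ j := hlex
  have hgtCM : pvElt grid i j < pvCM grid b0 := hgtA
  have hsad : pvSaddle grid i j := ⟨hminij, (pv_CM_iff grid i j hi).mp hcm'⟩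
  obtain ⟨k0, hk0, hgt0⟩ := pv_CM_gt grid (pvElt grid i j) b0 (by omega) hgtCM
  obtain ⟨i', hi', j', hj', hsad', hlast⟩ :=
    pv_exists_last grid ⟨i, hi, j, hj, hsad⟩
  have hB : find_saddle_point_coordinates_alt grid = some [(i' : Int), (j' : Int)] :=
    pv_B_last grid hpre i' j' hi' hj' hsad' hlast
  rw [hB]
  -- the interfering cell also interferes with the last saddle (saddle values agree)
  have hveq : pvElt grid i j = pvElt grid i' j' :=
    pv_saddle_val_eq grid hpre i j i' j' hi hj hi' hj' hsad hsad'
  have hle' : pvLexLe (a0, b0) (i', j') :=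
    pv_lexLe_trans (a0, b0) (i, j) (i', j') (by exact hle0) (hlast i hi j hj hsad)
  have hgt' : pvElt grid i' j' < pvElt grid k0 b0 := by omega
  have hne : (a0, b0) ≠ (i', j') := by
    intro heq
    have h2 : b0 = j' := congrArg Prod.snd heq
    subst h2
    exact absurd (hsad'.2 k0 hk0) (by omega)
  exact pv_A_ne grid hpre i' j' hi' hj' (a0, b0) ha0 hb0 hmin0
    (pv_lexLt_of_le_of_ne _ _ hle' hne) ⟨k0, hk0, hgt'⟩
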